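-- pv_equiv track=rewrite | github.com/SSOURABH58/Ig-bot | hase code pizza/pizza_problem2.py | pizzatype
-- ===== SOURCE A (Python) =====
-- def pizzatype(original,sorted):   #it takes original and sorted list and return a list with the index of elements
--     sizes=[]
--     original.sort()
--     for x in sorted:
--         for i,y in enumerate(original):
--             if(x==y):
--                 if(i not in sizes):
--                     sizes.append(i)
--                     break
--     sizes.sort()
--     return sizes
-- ===== SOURCE B (Python) =====
-- def pizzatype(original, sorted):
--     # B: sort once, precompute first-index and count per value, then answer each
--     # query in O(1) with a moving per-value pointer; O(n log n) total vs A's O(n*m).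
--     # (Like A, this sorts `original` in place.)
--     original.sort()
--     first = {}
--     for i, v in enumerate(original):
--         if v not in first:
--             first[v] = i
--     count = {}
--     for v in original:
--         count[v] = count.get(v, 0) + 1
--     nxt = dict(first)
--     res = []
--     for x in sorted:
--         if x in first:
--             n = nxt[x]
--             if n < first[x] + count[x]:
--                 res.append(n)
--                 nxt[x] = n + 1
--     res.sort()
--     return res
-- ===== Notes on version B (the rewrite author's own statement) =====
-- stated objective: faster
-- what changed: Replaces A's per-query linear scan of the sorted list (with a membership test against the growing index list) by a precomputed first-index/count table per value and a moving per-value pointer, answering each query in O(1).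
import Mathlib
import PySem

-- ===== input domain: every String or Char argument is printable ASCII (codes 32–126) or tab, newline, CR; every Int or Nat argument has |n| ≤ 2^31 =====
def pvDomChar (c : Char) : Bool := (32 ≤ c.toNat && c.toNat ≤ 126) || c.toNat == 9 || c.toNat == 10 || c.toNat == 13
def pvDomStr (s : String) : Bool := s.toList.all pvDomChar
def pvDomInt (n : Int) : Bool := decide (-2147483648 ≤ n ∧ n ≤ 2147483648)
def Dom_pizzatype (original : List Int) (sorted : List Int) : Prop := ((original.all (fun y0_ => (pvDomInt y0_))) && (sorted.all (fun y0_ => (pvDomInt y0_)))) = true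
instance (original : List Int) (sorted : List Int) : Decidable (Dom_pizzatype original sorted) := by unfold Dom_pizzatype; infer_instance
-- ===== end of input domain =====

-- B replaces A's per-query linear scan (with an 'in sizes' test) by a first-index/count
-- table and a moving per-value pointer (objective: faster; equivalence is about the
-- return value — both, like A's Python, sort `original` in place).

-- ===== PORT A =====
-- inner 'for i,y in enumerate(original): if x==y: if i not in sizes: append; break'
def pizzaScan (x : Int) (sizes : List Int) : List (Int × Int) → List Int
  | [] => sizes
  | (i, y) :: rest =>
    if x == y then
      if sizes.contains i then pizzaScan x sizes rest
      else sizes ++ [i]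
    else pizzaScan x sizes rest

def pizzatype (original : List Int) (sorted : List Int) : List Int :=
  let orig := PySem.List.sorted original (fun y => y) false
  let sizes := sorted.foldl (fun sizes x => pizzaScan x sizes (PySem.List.enumerate orig 0)) []
  PySem.List.sorted sizes (fun y => y) false

-- ===== PORT B =====
-- first = {}; for i, v in enumerate(original): if v not in first: first[v] = i
def pizzaFirst (orig : List Int) : PySem.Dict Int Int :=
  (PySem.List.enumerate orig 0).foldl
    (fun d p => if d.contains p.2 then d else d.insert p.2 p.1) PySem.Dict.empty

-- count = {}; for v in original: count[v] = count.get(v, 0) + 1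
def pizzaCount (orig : List Int) : PySem.Dict Int Int :=
  orig.foldl (fun d v => d.insert v (d.getD v 0 + 1)) PySem.Dict.empty

-- one iteration of 'for x in sorted'; nxt[x] / first[x] / count[x] are read with getD 0,
-- exact because the branch guarantees the key is present.
def pizzaStepB (first count : PySem.Dict Int Int)
    (p : PySem.Dict Int Int × List Int) (x : Int) : PySem.Dict Int Int × List Int :=
  if first.contains x then
    let n := p.1.getD x 0
    if n < first.getD x 0 + count.getD x 0 then (p.1.insert x (n + 1), p.2 ++ [n])
    else p
  else p

def pizzatype_alt (original : List Int) (sorted : List Int) : List Int :=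
  let orig := PySem.List.sorted original (fun y => y) false
  let first := pizzaFirst orig
  let count := pizzaCount orig
  let res := (sorted.foldl (pizzaStepB first count) (first, [])).2
  PySem.List.sorted res (fun y => y) false

-- ===== PRECONDITION & SPEC =====
def Spec_pizzatype (original : List Int) (sorted : List Int) (out : List Int) : Prop := out = pizzatype_alt original sorted
instance (original : List Int) (sorted : List Int) (out : List Int) : Decidable (Spec_pizzatype original sorted out) := by unfold Spec_pizzatype; infer_instance

-- ===== CLAIM (what is proved, stated in full; the proofs are below) =====
def Claim_equal_pizzatype : Prop := ∀ (original : List Int) (sorted : List Int), Dom_pizzatype original sorted → Spec_pizzatype original sorted (pizzatype original sorted)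

-- ===== LEMMAS AND PROOFS =====

-- first index of v (as A's sorted list is scanned front to back)
def firstIdx (v : Int) : List Int → Nat
  | [] => 0
  | h :: t => if h = v then 0 else firstIdx v t + 1

theorem firstIdx_le {l : List Int} : ∀ (i : Nat) (h : i < l.length), firstIdx l[i] l ≤ i := by
  induction l with
  | nil => intro i h; simp at h
  | cons a t ih =>
    intro i h
    cases i with
    | zero => simp [firstIdx]
    | succ j =>
      simp only [List.getElem_cons_succ, firstIdx]
      split
      · omega
      · have := ih j (by simpa using h); omega

theorem pizzaFirst_get?_aux (v : Int) :
    ∀ (l : List Int) (s : Int) (d : PySem.Dict Int Int),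
      ((PySem.List.enumerate l s).foldl
        (fun d p => if d.contains p.2 then d else d.insert p.2 p.1) d).get? v =
      if d.contains v = true then d.get? v
      else if v ∈ l then some (s + (firstIdx v l : Int)) else none := by
  intro l
  induction l with
  | nil =>
    intro s d
    rw [PySem.List.enumerate_nil]
    simp only [List.foldl_nil, List.not_mem_nil, if_false]
    by_cases hv : d.contains v = true
    · rw [if_pos hv]
    · rw [if_neg hv, (PySem.Dict.get?_eq_none_iff_contains d v).2 (by simpa using hv)]
  | cons h t ih =>
    intro s d
    rw [PySem.List.enumerate_cons, List.foldl_cons]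
    by_cases hvh : v = h
    · subst hvh
      by_cases hc : d.contains v = true
      · rw [if_pos hc, ih, if_pos hc, if_pos hc]
      · rw [if_neg hc, ih, if_neg hc,
          if_pos (PySem.Dict.contains_insert_self d v s),
          PySem.Dict.get?_insert_self, if_pos List.mem_cons_self]
        simp [firstIdx]
    · have hhv : ¬ h = v := fun h' => hvh h'.symm
      have hfi : firstIdx v (h :: t) = firstIdx v t + 1 := by
        simp [firstIdx, hhv]
      have htail : ∀ s' : Int,
          (if d.contains v = true then d.get? v
           else if v ∈ t then some (s' + 1 + (firstIdx v t : Int)) else none) =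
          (if d.contains v = true then d.get? v
           else if v ∈ h :: t then some (s' + (firstIdx v (h :: t) : Int)) else none) := by
        intro s'
        by_cases hv : d.contains v = true
        · rw [if_pos hv, if_pos hv]
        · rw [if_neg hv, if_neg hv]
          by_cases hm : v ∈ t
          · rw [if_pos hm, if_pos (List.mem_cons_of_mem h hm), hfi]
            congr 1
            push_cast
            ring
          · rw [if_neg hm, if_neg (by simp [hvh, hm])]
      by_cases hc : d.contains h = true
      · rw [if_pos hc, ih]
        exact htail s
      · rw [if_neg hc, ih]
        have hcc : (d.insert h s).contains v = d.contains v := by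
          rw [PySem.Dict.contains_insert]
          simp [hvh]
        rw [hcc, PySem.Dict.get?_insert_of_ne d s hvh]
        exact htail s

theorem pizzaFirst_get? (orig : List Int) (v : Int) :
    (pizzaFirst orig).get? v = if v ∈ orig then some ((firstIdx v orig : Int)) else none := by
  unfold pizzaFirst
  rw [pizzaFirst_get?_aux]
  simp [PySem.Dict.contains_empty]

theorem pizzaCount_getD (orig : List Int) (v : Int) :
    (pizzaCount orig).getD v 0 = (orig.count v : Int) := by
  unfold pizzaCount
  rw [PySem.Dict.getD_foldl_insert_add_one]
  simp [PySem.Dict.getD_empty]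

-- the scan is a find?
theorem pizzaScan_eq_find (x : Int) (sizes : List Int) (pairs : List (Int × Int)) :
    pizzaScan x sizes pairs =
      match pairs.find? (fun p => x == p.2 && !(sizes.contains p.1)) with
      | some p => sizes ++ [p.1]
      | none => sizes := by
  induction pairs with
  | nil => simp [pizzaScan]
  | cons p rest ih =>
    obtain ⟨i, y⟩ := p
    simp only [pizzaScan, List.find?_cons]
    by_cases hxy : (x == y) = true
    · by_cases hc : i ∈ sizes
      · have hc' : sizes.contains i = true := by simpa using hc
        simp [hxy, hc, ih]
      · have hc' : sizes.contains i = false := by simpa using hc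
        simp [hxy, hc]
    · have hxy' : (x == y) = false := by simpa using hxy
      simp [hxy', ih]

-- decomposition of a sorted list around the run of one of its members
theorem sorted_run (v : Int) :
    ∀ (l : List Int), l.Pairwise (· ≤ ·) → v ∈ l →
    ∃ pre post, l = pre ++ List.replicate (l.count v) v ++ post ∧
      (∀ y ∈ pre, y ≠ v) ∧ (∀ y ∈ post, y ≠ v) := by
  intro l
  induction l with
  | nil => intro _ h; simp at h
  | cons h t ih =>
    intro hs hm
    by_cases hv : h = v
    · subst hv
      -- the run is h :: takeWhile (= h) t
      refine ⟨[], t.dropWhile (fun y => y == h), ?_, by simp, ?_⟩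
      · have hsplit := (List.takeWhile_append_dropWhile (p := fun y => y == h) (l := t)).symm
        have hcount : (h :: t).count h = (t.takeWhile (fun y => y == h)).length + 1 := by
          rw [List.count_cons_self]
          congr 1
          conv_lhs => rw [hsplit]
          rw [List.count_append]
          have h1 : (t.takeWhile (fun y => y == h)).count h = (t.takeWhile (fun y => y == h)).length := by
            apply List.count_eq_length.2
            intro y hy
            have := List.mem_takeWhile_imp hy
            exact (beq_iff_eq.1 this).symm
          have h2 : (t.dropWhile (fun y => y == h)).count h = 0 := by
            apply List.count_eq_zero.2
            intro hmem
            -- head of dropWhile is ≠ h and everything in t is ≥ h, dropWhile is sorted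
            cases hd : t.dropWhile (fun y => y == h) with
            | nil => simp [hd] at hmem
            | cons a r =>
              have ha : ¬ (a == h) = true := by
                have := List.head?_dropWhile_not (p := fun y => y == h) (l := t)
                rw [hd] at this; simpa using this
              have hat : a ∈ t := by
                have : a ∈ t.dropWhile (fun y => y == h) := by rw [hd]; exact List.mem_cons_self
                exact (List.dropWhile_sublist (fun y => y == h)).subset this
              have hne : a ≠ h := fun he => ha (beq_iff_eq.2 he)
              have hha : h ≤ a := (List.pairwise_cons.1 hs).1 a hat
              have hlt : h < a := lt_of_le_of_ne hha (Ne.symm hne)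
              -- dropWhile is a suffix of t, so pairwise; all its elements ≥ a > h
              have hsp : (a :: r).Pairwise (· ≤ ·) := by
                have : (t.dropWhile (fun y => y == h)).Pairwise (· ≤ ·) :=
                  ((List.pairwise_cons.1 hs).2).sublist (List.dropWhile_sublist _)
                rwa [hd] at this
              rw [hd] at hmem
              rcases List.mem_cons.1 hmem with rfl | hmem'
              · exact hne rfl
              · have : a ≤ h := (List.pairwise_cons.1 hsp).1 h hmem'
                omega
          rw [h1, h2]; omega
        rw [hcount]
        have : List.replicate ((t.takeWhile (fun y => y == h)).length + 1) h =
            h :: List.replicate ((t.takeWhile (fun y => y == h)).length) h := by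
          simp [List.replicate_succ]
        rw [this]
        simp only [List.nil_append, List.cons_append, List.cons.injEq, true_and]
        conv_lhs => rw [hsplit]
        congr 1
        apply List.eq_replicate_of_mem
        intro y hy
        have := List.mem_takeWhile_imp hy
        exact beq_iff_eq.1 this
      · intro y hy
        cases hd : t.dropWhile (fun y => y == h) with
        | nil => simp [hd] at hy
        | cons a r =>
          rw [hd] at hy
          have ha : ¬ (a == h) = true := by
            have := List.head?_dropWhile_not (p := fun y => y == h) (l := t)
            rw [hd] at this; simpa using this
          have hat : a ∈ t := by
            have : a ∈ t.dropWhile (fun y => y == h) := by rw [hd]; exact List.mem_cons_self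
            exact (List.dropWhile_sublist (fun y => y == h)).subset this
          have hne : a ≠ h := fun he => ha (beq_iff_eq.2 he)
          have hha : h ≤ a := (List.pairwise_cons.1 hs).1 a hat
          have hlt : h < a := lt_of_le_of_ne hha (Ne.symm hne)
          have hsp : (a :: r).Pairwise (· ≤ ·) := by
            have : (t.dropWhile (fun y => y == h)).Pairwise (· ≤ ·) :=
              ((List.pairwise_cons.1 hs).2).sublist (List.dropWhile_sublist _)
            rwa [hd] at this
          rcases List.mem_cons.1 hy with rfl | hy'
          · omega
          · have : a ≤ y := (List.pairwise_cons.1 hsp).1 y hy'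
            omega
    · have hmt : v ∈ t := by
        rcases List.mem_cons.1 hm with rfl | h'
        · exact absurd rfl hv
        · exact h'
      obtain ⟨pre, post, heq, hpre, hpost⟩ := ih (List.pairwise_cons.1 hs).2 hmt
      have hvne : v ≠ h := fun e => hv e.symm
      refine ⟨h :: pre, post, ?_, ?_, hpost⟩
      · rw [List.count_cons_of_ne hv]
        conv_lhs => rw [heq]
        simp
      · intro y hy
        rcases List.mem_cons.1 hy with rfl | hy'
        · exact hv
        · exact hpre y hy'

-- find? over the enumerated run, hitting position n
theorem find?_run_hit (x : Int) (q : Int → Bool) :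
    ∀ (c : Nat) (s n : Int), s ≤ n → n < s + c →
      (∀ i : Int, s ≤ i → i < s + c → (q i = true ↔ ¬ i < n)) →
      (PySem.List.enumerate (List.replicate c x) s).find?
        (fun p => x == p.2 && q p.1) = some (n, x) := by
  intro c
  induction c with
  | zero => intro s n h1 h2 _; omega
  | succ c ih =>
    intro s n h1 h2 hq
    rw [List.replicate_succ, PySem.List.enumerate_cons, List.find?_cons]
    by_cases hsn : s = n
    · subst hsn
      have : q s = true := (hq s le_rfl (by omega)).2 (by omega)
      simp [this]
    · have hslt : s < n := lt_of_le_of_ne h1 hsn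
      have : q s = false := by
        by_contra hc
        have : q s = true := by simpa using hc
        exact absurd hslt (by simpa using (hq s le_rfl (by omega)).1 this)
      simp only [beq_self_eq_true, Bool.true_and, this]
      have := ih (s + 1) n (by omega) (by omega)
        (fun i hi1 hi2 => hq i (by omega) (by push_cast at hi2 ⊢; omega))
      simpa using this

-- find? over the enumerated run, everything already taken
theorem find?_run_none (x : Int) (q : Int → Bool) :
    ∀ (c : Nat) (s : Int),
      (∀ i : Int, s ≤ i → i < s + c → q i = false) →
      (PySem.List.enumerate (List.replicate c x) s).find?
        (fun p => x == p.2 && q p.1) = none := by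
  intro c
  induction c with
  | zero => intro s _; simp [PySem.List.enumerate_nil]
  | succ c ih =>
    intro s hq
    rw [List.replicate_succ, PySem.List.enumerate_cons, List.find?_cons]
    have h0 : q s = false := hq s le_rfl (by omega)
    simp only [beq_self_eq_true, Bool.true_and, h0]
    have := ih (s + 1) (fun i hi1 hi2 => hq i (by omega) (by push_cast at hi2 ⊢; omega))
    simpa using this

-- find? is none on a segment with no value x
theorem find?_seg_none (x : Int) (q : Int → Bool) (l : List Int) (s : Int)
    (h : ∀ y ∈ l, y ≠ x) :
    (PySem.List.enumerate l s).find? (fun p => x == p.2 && q p.1) = none := by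
  apply List.find?_eq_none.2
  intro p hp
  obtain ⟨k, hk, rfl⟩ := (PySem.List.mem_enumerate_iff _ _ _).1 hp
  have := h l[k] (List.getElem_mem hk)
  simp [Ne.symm this]

-- the invariant tying A's sizes list to B's pointer dict
def PzInv (orig : List Int) (nxt : PySem.Dict Int Int) (sizes : List Int) : Prop :=
  (∀ v : Int, v ∈ orig → ∃ n : Int, nxt.get? v = some n ∧
      (firstIdx v orig : Int) ≤ n ∧ n ≤ (firstIdx v orig : Int) + (orig.count v : Int)) ∧
  (∀ (i : Nat) (h : i < orig.length), ((i : Int) ∈ sizes ↔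
      ∃ n : Int, nxt.get? orig[i] = some n ∧ (i : Int) < n)) ∧
  (∀ j ∈ sizes, ∃ i : Nat, i < orig.length ∧ j = (i : Int))

-- positional facts from the decomposition
theorem run_getElem (orig pre post : List Int) (v : Int) (c : Nat)
    (heq : orig = pre ++ List.replicate c v ++ post) :
    ∀ k : Nat, k < c → ∃ h : pre.length + k < orig.length, orig[pre.length + k] = v := by
  subst heq
  intro k hk
  refine ⟨by simp; omega, ?_⟩
  rw [List.getElem_append_left (by simp; omega)]
  rw [List.getElem_append_right (by omega)]
  simp

theorem one_step (orig : List Int) (hs : orig.Pairwise (· ≤ ·))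
    (nxt : PySem.Dict Int Int) (sizes : List Int) (x : Int)
    (hInv : PzInv orig nxt sizes) :
    pizzaScan x sizes (PySem.List.enumerate orig 0) =
      (pizzaStepB (pizzaFirst orig) (pizzaCount orig) (nxt, sizes) x).2 ∧
    PzInv orig (pizzaStepB (pizzaFirst orig) (pizzaCount orig) (nxt, sizes) x).1
      (pizzaScan x sizes (PySem.List.enumerate orig 0)) := by
  obtain ⟨hInv1, hInv2, hInv3⟩ := hInv
  rw [pizzaScan_eq_find]
  by_cases hx : x ∈ orig
  case neg =>
    -- x not in original: A finds nothing, B's contains test fails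
    have hfind : (PySem.List.enumerate orig 0).find?
        (fun p => x == p.2 && !(sizes.contains p.1)) = none :=
      find?_seg_none x (fun i => !(sizes.contains i)) orig 0
        (fun y hy hyx => hx (hyx ▸ hy))
    have hcont : (pizzaFirst orig).contains x = false := by
      rw [PySem.Dict.contains_eq_isSome_get?, pizzaFirst_get? orig x, if_neg hx]
      rfl
    rw [hfind]
    simp only [pizzaStepB, hcont]
    exact ⟨rfl, hInv1, hInv2, hInv3⟩
  case pos =>
    obtain ⟨pre, post, heq, hpre, hpost⟩ := sorted_run x orig hs hx
    set c := orig.count x with hc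
    set f := firstIdx x orig with hf
    have hfpre : f = pre.length := by
      rw [hf]
      have : orig = pre ++ (x :: (List.replicate (c-1) x ++ post)) := by
        rw [heq]
        have hcpos : 0 < c := by rw [hc]; exact List.count_pos_iff.2 hx
        have hrep : List.replicate c x = x :: List.replicate (c-1) x := by
          conv_lhs => rw [show c = (c - 1) + 1 from by omega]
          simp [List.replicate_succ]
        simp [hrep]
      rw [this]
      clear this heq
      induction pre with
      | nil => simp [firstIdx]
      | cons a t ih =>
        have ha : a ≠ x := hpre a List.mem_cons_self
        simp only [List.cons_append, firstIdx, List.length_cons]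
        rw [if_neg ha, ih (fun y hy => hpre y (List.mem_cons_of_mem a hy))]
    have hlen : orig.length = pre.length + (c + post.length) := by
      rw [heq]; simp
    have hcont : (pizzaFirst orig).contains x = true := by
      rw [PySem.Dict.contains_eq_isSome_get?, pizzaFirst_get? orig x, if_pos hx]; rfl
    have hgetf : (pizzaFirst orig).getD x 0 = (f : Int) := by
      rw [PySem.Dict.getD_eq_get?_getD, pizzaFirst_get? orig x, if_pos hx]; rfl
    have hgetc : (pizzaCount orig).getD x 0 = (c : Int) := pizzaCount_getD orig x
    obtain ⟨n, hn, hn1, hn2⟩ := hInv1 x hx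
    rw [← hf] at hn1 hn2
    rw [← hc] at hn2
    have hgetn : nxt.getD x 0 = n := by rw [PySem.Dict.getD_eq_get?_getD, hn]; rfl
    -- decompose the enumerate and the find?
    have henum : PySem.List.enumerate orig 0 =
        PySem.List.enumerate pre 0 ++
        PySem.List.enumerate (List.replicate c x) (0 + pre.length) ++
        PySem.List.enumerate post (0 + ((pre ++ List.replicate c x).length : Int)) := by
      rw [heq, PySem.List.enumerate_append, PySem.List.enumerate_append]
    have hprenone : (PySem.List.enumerate pre 0).find?
        (fun p => x == p.2 && !(sizes.contains p.1)) = none :=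
      find?_seg_none x (fun i => !(sizes.contains i)) pre 0 hpre
    have hpostnone : ∀ s, (PySem.List.enumerate post s).find?
        (fun p => x == p.2 && !(sizes.contains p.1)) = none :=
      fun s => find?_seg_none x (fun i => !(sizes.contains i)) post s hpost
    -- membership of run indices in sizes, via the invariant
    have hmem_run : ∀ i : Int, (f : Int) ≤ i → i < (f : Int) + (c : Int) →
        (i ∈ sizes ↔ i < n) := by
      intro i hi1 hi2
      have hinat : ∃ k : Nat, k < c ∧ i = ((pre.length + k : Nat) : Int) := by
        refine ⟨(i - f).toNat, by omega, by rw [hfpre] at hi1 ⊢; push_cast; omega⟩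
      obtain ⟨k, hk, rfl⟩ := hinat
      obtain ⟨hlt, hget⟩ := run_getElem orig pre post x c heq k hk
      rw [hInv2 (pre.length + k) hlt]
      constructor
      · rintro ⟨m, hm, hmi⟩
        rw [hget] at hm
        rw [hm] at hn
        injection hn with h'
        omega
      · intro h'
        exact ⟨n, by rw [hget]; exact hn, h'⟩
    by_cases hcase : n < (f : Int) + (c : Int)
    case pos =>
      -- A finds index n; B appends n and bumps the pointer
      have hfind : (PySem.List.enumerate orig 0).find?
          (fun p => x == p.2 && !(sizes.contains p.1)) = some (n, x) := by
        rw [henum, List.find?_append, List.find?_append, hprenone, hpostnone]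
        simp only [Option.none_or, Option.or_none]
        apply find?_run_hit x (fun i => !(sizes.contains i)) c (0 + (pre.length : Int)) n
        · rw [hfpre] at hn1; omega
        · rw [hfpre] at hcase; omega
        · intro i hi1 hi2
          have h1 : (f : Int) ≤ i := by rw [hfpre]; omega
          have h2 : i < (f : Int) + (c : Int) := by rw [hfpre]; omega
          rw [← hmem_run i h1 h2]
          by_cases hmem : i ∈ sizes <;> simp [hmem]
      rw [hfind]
      have hstep : pizzaStepB (pizzaFirst orig) (pizzaCount orig) (nxt, sizes) x =
          (nxt.insert x (n + 1), sizes ++ [n]) := by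
        simp only [pizzaStepB, hcont, if_pos, hgetn, hgetf, hgetc]
        rw [if_pos hcase]
      rw [hstep]
      refine ⟨rfl, ?_, ?_, ?_⟩
      · -- pointer bounds
        intro v hv
        by_cases hvx : v = x
        · subst hvx
          exact ⟨n + 1, PySem.Dict.get?_insert_self nxt v (n+1), by omega, by omega⟩
        · obtain ⟨m, hm, hm1, hm2⟩ := hInv1 v hv
          exact ⟨m, by rw [PySem.Dict.get?_insert_of_ne nxt _ hvx]; exact hm, hm1, hm2⟩
      · -- membership characterisation
        intro i hi
        by_cases hvx : orig[i] = x
        · rw [hvx, PySem.Dict.get?_insert_self]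
          have hfi : (f : Int) ≤ (i : Int) ∧ (i : Int) < (f : Int) + (c : Int) := by
            constructor
            · have : firstIdx orig[i] orig ≤ i := firstIdx_le i hi
              rw [hvx] at this; rw [hf]; exact_mod_cast this
            · -- i is in the run: orig[i] = x forces position inside the replicate
              by_contra hcon
              have hige : (f : Int) + (c : Int) ≤ (i : Int) := by omega
              have hinat : pre.length + c ≤ i := by rw [hfpre] at hige; exact_mod_cast hige
              have hmm : orig[i] ∈ post := by
                have hpp : orig[i] = (pre ++ List.replicate c x ++ post)[i]'(heq ▸ hi) :=
                  List.getElem_of_eq heq hi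
                rw [hpp, List.getElem_append_right (by simp; omega)]
                apply List.getElem_mem
              exact hpost _ hmm hvx
          constructor
          · intro hmem
            rcases List.mem_append.1 hmem with hmem | hmem
            · have := (hmem_run (i : Int) hfi.1 hfi.2).1 hmem
              exact ⟨n + 1, rfl, by omega⟩
            · simp only [List.mem_singleton] at hmem
              exact ⟨n + 1, rfl, by omega⟩
          · rintro ⟨m, hm, hmi⟩
            injection hm with h'
            subst h'
            by_cases hin : (i : Int) = n
            · exact List.mem_append.2 (Or.inr (by simp [hin]))
            · exact List.mem_append.2 (Or.inl ((hmem_run (i : Int) hfi.1 hfi.2).2 (by omega)))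
        · rw [PySem.Dict.get?_insert_of_ne nxt _ hvx]
          rw [List.mem_append]
          rw [hInv2 i hi]
          simp only [List.mem_singleton]
          constructor
          · rintro (h' | h')
            · exact h'
            · -- i = n impossible: orig[n] = x ≠ orig[i]
              exfalso
              have hfi : (f : Int) ≤ (i : Int) := by
                rw [h']; exact hn1
              have hfi2 : (i : Int) < (f : Int) + (c : Int) := by rw [h']; exact hcase
              have hinat : ∃ k : Nat, k < c ∧ i = pre.length + k := by
                rw [hfpre] at hfi hfi2
                refine ⟨i - pre.length, by omega, by omega⟩
              obtain ⟨k, hk, hik⟩ := hinat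
              obtain ⟨_, hget⟩ := run_getElem orig pre post x c heq k hk
              subst hik
              exact hvx (by simpa using hget)
          · intro h'; exact Or.inl h'
      · -- sizes elements are valid indices
        intro j hj
        rcases List.mem_append.1 hj with hj | hj
        · exact hInv3 j hj
        · simp only [List.mem_singleton] at hj
          rw [hj]
          refine ⟨(pre.length + (n - f).toNat), ?_, ?_⟩
          · rw [hfpre] at hn1 hcase; omega
          · rw [hfpre] at hn1; omega
    case neg =>
      -- run exhausted: A finds nothing, B leaves the state alone
      have hneq : n = (f : Int) + (c : Int) := by omega
      have hfind : (PySem.List.enumerate orig 0).find?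
          (fun p => x == p.2 && !(sizes.contains p.1)) = none := by
        rw [henum, List.find?_append, List.find?_append, hprenone, hpostnone]
        simp only [Option.none_or, Option.or_none]
        apply find?_run_none x (fun i => !(sizes.contains i)) c
        intro i hi1 hi2
        have h1 : (f : Int) ≤ i := by rw [hfpre]; omega
        have h2 : i < (f : Int) + (c : Int) := by rw [hfpre]; push_cast at hi2 ⊢; omega
        have : i ∈ sizes := (hmem_run i h1 h2).2 (by omega)
        simp [this]
      rw [hfind]
      have hstep : pizzaStepB (pizzaFirst orig) (pizzaCount orig) (nxt, sizes) x =
          (nxt, sizes) := by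
        simp only [pizzaStepB, hcont, if_pos, hgetn, hgetf, hgetc]
        rw [if_neg hcase]
      rw [hstep]
      exact ⟨rfl, hInv1, hInv2, hInv3⟩

theorem fold_eq (orig : List Int) (hs : orig.Pairwise (· ≤ ·)) :
    ∀ (s : List Int) (nxt : PySem.Dict Int Int) (sizes : List Int),
      PzInv orig nxt sizes →
      s.foldl (fun sz x => pizzaScan x sz (PySem.List.enumerate orig 0)) sizes =
      (s.foldl (pizzaStepB (pizzaFirst orig) (pizzaCount orig)) (nxt, sizes)).2 := by
  intro s
  induction s with
  | nil => intro nxt sizes _; rfl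
  | cons x t ih =>
    intro nxt sizes hInv
    simp only [List.foldl_cons]
    obtain ⟨heq, hInv'⟩ := one_step orig hs nxt sizes x hInv
    have hpair : pizzaStepB (pizzaFirst orig) (pizzaCount orig) (nxt, sizes) x =
        ((pizzaStepB (pizzaFirst orig) (pizzaCount orig) (nxt, sizes) x).1,
         pizzaScan x sizes (PySem.List.enumerate orig 0)) := by
      rw [heq]
    rw [hpair] at hInv' ⊢
    exact ih _ _ hInv'

theorem inv_init (orig : List Int) : PzInv orig (pizzaFirst orig) [] := by
  refine ⟨?_, ?_, ?_⟩
  · intro v hv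
    refine ⟨(firstIdx v orig : Int), ?_, le_refl _, ?_⟩
    · rw [pizzaFirst_get? orig v, if_pos hv]
    · have : 0 < orig.count v := List.count_pos_iff.2 hv
      omega
  · intro i hi
    simp only [List.not_mem_nil, false_iff]
    rintro ⟨n, hn, hlt⟩
    rw [pizzaFirst_get? orig orig[i], if_pos (List.getElem_mem hi)] at hn
    injection hn with h'
    subst h'
    have := firstIdx_le i hi
    omega
  · intro j hj; simp at hj

-- ===== VERDICT (by name: the statement is the Claim_ definition above) =====
theorem pizzatype_spec : Claim_equal_pizzatype := by
  intro original sorted _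
  unfold Spec_pizzatype pizzatype pizzatype_alt
  have hs : (PySem.List.sorted original (fun y => y) false).Pairwise (· ≤ ·) := by
    have := PySem.List.sorted_pairwise original (fun y => y)
    simpa using this
  exact congrArg (fun l => PySem.List.sorted l (fun y => y) false)
    (fold_eq _ hs sorted (pizzaFirst _) [] (inv_init _))
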